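-- pv_equiv track=rewrite | github.com/alinaveed62/RAG-Project-Source-Code | evaluation/metrics/retrieval_metrics.py | _build_section_index
-- ===== SOURCE A (Python) =====
-- from collections.abc import Iterable, Mapping
-- from typing import Any
--
-- def _build_section_index(chunks: Iterable[Mapping[str, Any]]) -> dict[str, list[str]]:
--     index: dict[str, list[str]] = {}
--     for chunk in chunks:
--         section = chunk.get("section", "")
--         chunk_id = chunk.get("id")
--         if not chunk_id:
--             continue
--         index.setdefault(section, []).append(chunk_id)
--     return index
-- ===== SOURCE B (Python) =====
-- from collections.abc import Iterable, Mapping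
-- from typing import Any
--
-- def _build_section_index(chunks: Iterable[Mapping[str, Any]]) -> dict[str, list[str]]:
--     pairs = [(chunk.get("section", ""), chunk.get("id"))
--              for chunk in chunks if chunk.get("id")]
--     index: dict[str, list[str]] = {}
--     for section, _ in pairs:
--         if section not in index:
--             index[section] = [cid for s, cid in pairs if s == section]
--     return index
-- ===== Notes on version B (the rewrite author's own statement) =====
-- stated objective: alternative
-- what changed: Replaces the incremental setdefault-append accumulation with a two-phase shape: first filter chunks into a (section, id) pair list, then build the dict by inserting each section on first occurrence with all its ids gathered from the pair list in one comprehension.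
import Mathlib
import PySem

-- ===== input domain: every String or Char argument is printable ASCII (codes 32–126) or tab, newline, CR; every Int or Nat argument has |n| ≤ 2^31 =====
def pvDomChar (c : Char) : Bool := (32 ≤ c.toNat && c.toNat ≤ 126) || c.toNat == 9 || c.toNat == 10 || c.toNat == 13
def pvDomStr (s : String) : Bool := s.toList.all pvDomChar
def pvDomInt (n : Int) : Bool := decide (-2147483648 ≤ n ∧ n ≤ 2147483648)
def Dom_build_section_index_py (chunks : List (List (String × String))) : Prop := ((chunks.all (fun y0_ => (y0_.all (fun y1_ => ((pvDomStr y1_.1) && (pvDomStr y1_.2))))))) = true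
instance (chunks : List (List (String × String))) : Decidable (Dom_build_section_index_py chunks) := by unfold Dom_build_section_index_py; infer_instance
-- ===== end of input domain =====

-- B builds the same index by a filter-then-gather two-phase pass instead of A's
-- incremental setdefault-append loop (objective: alternative decomposition, same result).

-- ===== PORT A =====
def build_section_index_py (chunks : List (List (String × String))) : List (String × List String) :=
  (chunks.foldl (fun index chunk =>
    let ch := PySem.Dict.ofList chunk
    let sect := ch.getD "section" ""
    match ch.get? "id" with
    | none => index                                  -- chunk_id is None: falsy, continue
    | some cid =>
        if cid = "" then index                        -- empty string: falsy, continue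
        else index.modify sect [] (fun v => v ++ [cid])   -- index.setdefault(section, []).append(chunk_id)
  ) PySem.Dict.empty).items

-- ===== PORT B =====
-- pairs = [(chunk.get("section",""), chunk.get("id")) for chunk in chunks if chunk.get("id")]
def pvPairsOf (chunks : List (List (String × String))) : List (String × String) :=
  chunks.filterMap (fun chunk =>
    let ch := PySem.Dict.ofList chunk
    match ch.get? "id" with
    | none => none
    | some cid => if cid = "" then none else some (ch.getD "section" "", cid))

def build_section_index_py_alt (chunks : List (List (String × String))) : List (String × List String) :=
  let ps := pvPairsOf chunks
  (ps.foldl (fun index p =>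
    if index.contains p.1 then index
    else index.insert p.1 ((ps.filter (fun q => q.1 == p.1)).map (·.2))
  ) PySem.Dict.empty).items

-- ===== PRECONDITION & SPEC =====
def Spec_build_section_index_py (chunks : List (List (String × String))) (out : List (String × List String)) : Prop := out = build_section_index_py_alt chunks
instance (chunks : List (List (String × String))) (out : List (String × List String)) : Decidable (Spec_build_section_index_py chunks out) := by unfold Spec_build_section_index_py; infer_instance

-- ===== CLAIM (what is proved, stated in full; the proofs are below) =====
def Claim_equal_build_section_index_py : Prop := ∀ (chunks : List (List (String × String))), Dom_build_section_index_py chunks → Spec_build_section_index_py chunks (build_section_index_py chunks)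

-- ===== LEMMAS AND PROOFS =====

-- A's per-chunk loop equals the modify-append loop over the filtered pair list.
lemma pvA_foldl_eq_pairs (chunks : List (List (String × String)))
    (d : PySem.Dict String (List String)) :
    chunks.foldl (fun index chunk =>
      let ch := PySem.Dict.ofList chunk
      let sect := ch.getD "section" ""
      match ch.get? "id" with
      | none => index
      | some cid =>
          if cid = "" then index
          else index.modify sect [] (fun v => v ++ [cid])) d
    = (pvPairsOf chunks).foldl (fun index p => index.modify p.1 [] (fun v => v ++ [p.2])) d := by
  induction chunks generalizing d with
  | nil => rfl
  | cons c cs ih =>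
      simp only [List.foldl_cons, pvPairsOf, List.filterMap_cons]
      cases h : (PySem.Dict.ofList c).get? "id" with
      | none => simpa [h, pvPairsOf] using ih d
      | some cid =>
          by_cases hc : cid = "" <;>
            simp [hc, pvPairsOf, ih]

-- Characterisation of B's loop: starting from a dict whose items are the gathered map over
-- the seen keys, the loop extends it to the seen-plus-processed keys.
lemma pvB_loop (G : String → List String) :
    ∀ (rest : List (String × String)) (seen : PySem.Set String)
      (d : PySem.Dict String (List String)),
      d.items = seen.map (fun k => (k, G k)) →
      (rest.foldl (fun index p =>
          if index.contains p.1 then index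
          else index.insert p.1 (G p.1)) d).items
        = (PySem.Set.update seen (rest.map Prod.fst)).map (fun k => (k, G k)) := by
  intro rest
  induction rest with
  | nil => intro seen d hd; simpa using hd
  | cons p rest ih =>
      intro seen d hd
      have hkeys : d.keys = seen := by
        have h0 : d.keys = d.items.map Prod.fst := rfl
        rw [h0, hd, List.map_map]
        simp [Function.comp_def]
      by_cases hmem : p.1 ∈ seen
      · have hcont : d.contains p.1 = true := by
          rw [PySem.Dict.contains_iff_mem_keys, hkeys]; exact hmem
        simp only [List.foldl_cons, hcont, List.map_cons,
          PySem.Set.update_cons]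
        rw [PySem.Set.add_of_mem hmem]
        exact ih seen d hd
      · have hcont : d.contains p.1 = false := by
          rw [← Bool.not_eq_true, PySem.Dict.contains_iff_mem_keys, hkeys]; exact hmem
        simp only [List.foldl_cons, hcont, Bool.false_eq_true, if_false, List.map_cons,
          PySem.Set.update_cons]
        rw [PySem.Set.add_of_not_mem hmem]
        apply ih (seen ++ [p.1])
        rw [PySem.Dict.items_insert]
        simp only [hcont, Bool.false_eq_true, if_false]
        rw [hd]
        simp
  
-- ===== VERDICT (by name: the statement is the Claim_ definition above) =====
theorem build_section_index_py_spec : Claim_equal_build_section_index_py := by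
  intro chunks _
  unfold Spec_build_section_index_py build_section_index_py build_section_index_py_alt
  rw [pvA_foldl_eq_pairs]
  set ps := pvPairsOf chunks with hps
  set G : String → List String := fun k => (ps.filter (fun q => q.1 == k)).map (·.2) with hG
  -- A side: keys and values of the modify-append loop
  have hA : (ps.foldl (fun index p => index.modify p.1 [] (fun v => v ++ [p.2]))
      PySem.Dict.empty).items
      = (PySem.Set.ofList (ps.map Prod.fst)).map (fun k => (k, G k)) := by
    have hnd : (ps.foldl (fun index p => index.modify p.1 [] (fun v => v ++ [p.2]))
        PySem.Dict.empty).keys.Nodup := by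
      exact PySem.Dict.nodup_keys_foldl_modify_key ps Prod.fst [] _ _ (by simp)
    rw [PySem.Dict.items_eq_map_keys _ hnd ([] : List String)]
    rw [PySem.Dict.keys_foldl_modify_key]
    simp only [PySem.Dict.keys_empty, PySem.Set.update_nil_left]
    apply List.map_congr_left
    intro k _
    rw [PySem.Dict.getD_foldl_modify_append]
    simp [hG]
  -- B side
  have hB := pvB_loop G ps PySem.Set.empty PySem.Dict.empty (by simp only [PySem.Set.empty, List.map_nil]; rfl)
  rw [hA, hB]
  simp [PySem.Set.empty, PySem.Set.update_nil_left]
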